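-- pv_equiv track=rewrite | github.com/muk-jjang/AlgoPulja | 3주차/서재은/파괴되지않은건물.py | skill_operation
-- ===== SOURCE A (Python) =====
-- def skill_operation(skill, N, M):
--     # N*M matrix에 skill의 영향을 받은 최종 skill map을 저장한다.
--     tmp = [[0] * (M+1) for _ in range(N+1)]
--     for s in skill:
--         type = s[0]
--         a,b,c,d = map(int,s[1:5])
--         degree = s[-1]
--         if type==2 : degree = -degree
--         tmp[a][b] -= degree
--         tmp[a][d+1] += degree
--         tmp[c+1][b] += degree
--         tmp[c+1][d+1] -= degree
--
--     for i in range(N+1):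
--         for j in range(M):
--             tmp[i][j+1] += tmp[i][j]
--
--     for j in range(M+1):
--         for i in range(N):
--             tmp[i+1][j] += tmp[i][j]
--     return tmp
-- ===== SOURCE B (Python) =====
-- def skill_operation(skill, N, M):
--     # Normalize each skill once: (a, b, c, d, degree) with the sign already applied.
--     deltas = []
--     for s in skill:
--         type = s[0]
--         a, b, c, d = map(int, s[1:5])
--         degree = s[-1]
--         if type == 2:
--             degree = -degree
--         deltas.append((a, b, c, d, degree))
--     # Build the answer grid directly: each cell is the 2-D prefix sum of the
--     # four difference marks, written in closed form per cell.
--     out = []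
--     for i in range(N + 1):
--         row = []
--         for j in range(M + 1):
--             v = 0
--             for (a, b, c, d, degree) in deltas:
--                 if a <= i and b <= j:
--                     v -= degree
--                 if a <= i and d + 1 <= j:
--                     v += degree
--                 if c + 1 <= i and b <= j:
--                     v += degree
--                 if c + 1 <= i and d + 1 <= j:
--                     v -= degree
--             row.append(v)
--         out.append(row)
--     return out
-- ===== Notes on version B (the rewrite author's own statement) =====
-- stated objective: alternative
-- what changed: A mutates a difference array (four imos marks per skill) and then runs horizontal and vertical in-place prefix-sum passes; B never mutates: it builds the grid directly, computing each cell as the closed-form 2-D prefix sum of the marks (four indicator comparisons per skill per cell).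
import Mathlib
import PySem

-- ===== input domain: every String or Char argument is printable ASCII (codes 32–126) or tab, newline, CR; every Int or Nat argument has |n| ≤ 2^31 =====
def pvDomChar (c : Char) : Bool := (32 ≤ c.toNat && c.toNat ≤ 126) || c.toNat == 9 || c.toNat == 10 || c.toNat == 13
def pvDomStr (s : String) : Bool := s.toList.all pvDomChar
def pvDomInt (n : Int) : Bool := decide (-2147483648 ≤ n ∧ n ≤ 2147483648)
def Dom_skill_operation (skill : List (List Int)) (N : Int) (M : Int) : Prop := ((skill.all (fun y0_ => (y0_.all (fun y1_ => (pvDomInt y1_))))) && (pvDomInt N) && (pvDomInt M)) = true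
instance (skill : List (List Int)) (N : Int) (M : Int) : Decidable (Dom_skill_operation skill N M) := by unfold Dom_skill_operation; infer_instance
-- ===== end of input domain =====

-- B replaces A's in-place difference-array marks + two prefix-sum passes by a pure
-- per-cell closed-form evaluation of the same 2-D prefix sum (objective: alternative,
-- not faster). Equality of RETURN values is what is proved.

-- ===== PORT A =====
-- tmp[p][q] += v  (Python indexing; Pre_ keeps every used index in 0..len-1)
def pvAdd2 (g : List (List Int)) (p q v : Int) : List (List Int) :=
  PySem.List.pySetD g p
    (PySem.List.pySetD (PySem.List.pyGetD g p []) q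
      (PySem.List.pyGetD (PySem.List.pyGetD g p []) q 0 + v))

-- tmp[p][q]
def pvGet2 (g : List (List Int)) (p q : Int) : Int :=
  PySem.List.pyGetD (PySem.List.pyGetD g p []) q 0

-- one iteration of A's first loop: write the four difference marks of skill s
def pvStepA (g : List (List Int)) (s : List Int) : List (List Int) :=
  let ty := PySem.List.pyGetD s 0 0
  let a := PySem.List.pyGetD s 1 0
  let b := PySem.List.pyGetD s 2 0
  let c := PySem.List.pyGetD s 3 0
  let d := PySem.List.pyGetD s 4 0
  let deg0 := PySem.List.pyGetD s (-1) 0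
  let degree := if ty == 2 then -deg0 else deg0
  pvAdd2 (pvAdd2 (pvAdd2 (pvAdd2 g a b (-degree)) a (d+1) degree) (c+1) b degree) (c+1) (d+1) (-degree)

def skill_operation (skill : List (List Int)) (N : Int) (M : Int) : List (List Int) :=
  let tmp := (PySem.List.pyRange 0 (N+1) 1).map (fun _ => List.replicate (M+1).toNat 0)
  let tmp := skill.foldl pvStepA tmp
  let tmp := (PySem.List.pyRange 0 (N+1) 1).foldl (fun g i =>
      (PySem.List.pyRange 0 M 1).foldl (fun g j => pvAdd2 g i (j+1) (pvGet2 g i j)) g) tmp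
  (PySem.List.pyRange 0 (M+1) 1).foldl (fun g j =>
      (PySem.List.pyRange 0 N 1).foldl (fun g i => pvAdd2 g (i+1) j (pvGet2 g i j)) g) tmp

-- ===== PORT B =====
-- one normalized skill: (a, b, c, d, degree) with the sign already applied
def pvDelta (s : List Int) : Int × Int × Int × Int × Int :=
  let ty := PySem.List.pyGetD s 0 0
  let a := PySem.List.pyGetD s 1 0
  let b := PySem.List.pyGetD s 2 0
  let c := PySem.List.pyGetD s 3 0
  let d := PySem.List.pyGetD s 4 0
  let deg0 := PySem.List.pyGetD s (-1) 0
  (a, b, c, d, if ty == 2 then -deg0 else deg0)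

-- the inner accumulation loop of B: value of cell (i, j)
def pvCell (deltas : List (Int × Int × Int × Int × Int)) (i j : Int) : Int :=
  deltas.foldl (fun v t =>
    let v := if t.1 ≤ i ∧ t.2.1 ≤ j then v - t.2.2.2.2 else v
    let v := if t.1 ≤ i ∧ t.2.2.2.1 + 1 ≤ j then v + t.2.2.2.2 else v
    let v := if t.2.2.1 + 1 ≤ i ∧ t.2.1 ≤ j then v + t.2.2.2.2 else v
    if t.2.2.1 + 1 ≤ i ∧ t.2.2.2.1 + 1 ≤ j then v - t.2.2.2.2 else v) 0

def skill_operation_alt (skill : List (List Int)) (N : Int) (M : Int) : List (List Int) :=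
  let deltas := skill.map pvDelta
  (PySem.List.pyRange 0 (N+1) 1).map (fun i =>
    (PySem.List.pyRange 0 (M+1) 1).map (fun j => pvCell deltas i j))

-- ===== PRECONDITION & SPEC =====
-- Rows shorter than 5 (A raises ValueError) and mark coordinates outside the grid are
-- excluded: out-of-range marks raise IndexError, while NEGATIVE coordinates make A
-- silently wrap to the opposite edge (Python negative indexing) — coordinates outside
-- the grid are outside the natural domain of this damage-grid routine.
def Pre_skill_operation (skill : List (List Int)) (N : Int) (M : Int) : Prop :=
  ∀ s ∈ skill, 5 ≤ s.length ∧
    0 ≤ s.getD 1 0 ∧ s.getD 1 0 ≤ N ∧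
    0 ≤ s.getD 3 0 + 1 ∧ s.getD 3 0 + 1 ≤ N ∧
    0 ≤ s.getD 2 0 ∧ s.getD 2 0 ≤ M ∧
    0 ≤ s.getD 4 0 + 1 ∧ s.getD 4 0 + 1 ≤ M
instance (skill : List (List Int)) (N : Int) (M : Int) : Decidable (Pre_skill_operation skill N M) := by
  unfold Pre_skill_operation; infer_instance

def pvWitness_skill_operation : List (List Int) × Int × Int := ([[1, 0, 0, 1, 1, 3], [2, 1, 1, 1, 1, 2]], 2, 2)

def Spec_skill_operation (skill : List (List Int)) (N : Int) (M : Int) (out : List (List Int)) : Prop := out = skill_operation_alt skill N M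
instance (skill : List (List Int)) (N : Int) (M : Int) (out : List (List Int)) : Decidable (Spec_skill_operation skill N M out) := by unfold Spec_skill_operation; infer_instance

-- ===== CLAIM (what is proved, stated in full; the proofs are below) =====
def Claim_equal_skill_operation : Prop := ∀ (skill : List (List Int)) (N : Int) (M : Int), Dom_skill_operation skill N M → Pre_skill_operation skill N M → Spec_skill_operation skill N M (skill_operation skill N M)

-- ===== LEMMAS AND PROOFS =====

-- grid abstraction: entry (i, j), defaulting to 0 outside, and the rectangular shape
def EntG (g : List (List Int)) (i j : Nat) : Int := (g.getD i []).getD j 0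

def ShapeG (g : List (List Int)) (R C : Nat) : Prop := g.length = R ∧ ∀ r ∈ g, r.length = C

-- the fields of one skill row, as both ports read them
def aS (s : List Int) : Int := PySem.List.pyGetD s 1 0
def bS (s : List Int) : Int := PySem.List.pyGetD s 2 0
def cS (s : List Int) : Int := PySem.List.pyGetD s 3 0
def dS (s : List Int) : Int := PySem.List.pyGetD s 4 0
def degS (s : List Int) : Int :=
  if PySem.List.pyGetD s 0 0 == 2 then -PySem.List.pyGetD s (-1) 0 else PySem.List.pyGetD s (-1) 0

-- the bounds Pre_ provides for one skill row
def OkS (s : List Int) (N M : Int) : Prop :=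
  0 ≤ aS s ∧ aS s ≤ N ∧ 0 ≤ cS s + 1 ∧ cS s + 1 ≤ N ∧
  0 ≤ bS s ∧ bS s ≤ M ∧ 0 ≤ dS s + 1 ∧ dS s + 1 ≤ M

lemma pre_okS {skill : List (List Int)} {N M : Int} (h : Pre_skill_operation skill N M)
    {s : List Int} (hs : s ∈ skill) : OkS s N M := by
  obtain ⟨-, h1, h2, h3, h4, h5, h6, h7, h8⟩ := h s hs
  unfold OkS aS bS cS dS
  rw [PySem.List.pyGetD_ofNat', PySem.List.pyGetD_ofNat', PySem.List.pyGetD_ofNat',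
    PySem.List.pyGetD_ofNat']
  exact ⟨h1, h2, h3, h4, h5, h6, h7, h8⟩

lemma length_row {g : List (List Int)} {R C : Nat} (h : ShapeG g R C) {i : Nat} (hi : i < R) :
    (g.getD i []).length = C := by
  obtain ⟨hL, hr⟩ := h
  have hlt : i < g.length := by omega
  rw [List.getD_eq_getElem?_getD, List.getElem?_eq_getElem hlt]
  exact hr _ (List.getElem_mem hlt)

lemma pvAdd2_eq_set {g : List (List Int)} {p : Int} (hp : 0 ≤ p) (q v : Int) :
    pvAdd2 g p q v =
      g.set p.toNat (PySem.List.pySetD (g.getD p.toNat []) q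
        (PySem.List.pyGetD (g.getD p.toNat []) q 0 + v)) := by
  unfold pvAdd2
  rw [PySem.List.pySetD_of_nonneg _ _ hp, PySem.List.pyGetD_of_nonneg _ _ hp]

lemma shape_pvAdd2 {g : List (List Int)} {R C : Nat} (h : ShapeG g R C) {p : Int}
    (hp : 0 ≤ p) (q v : Int) : ShapeG (pvAdd2 g p q v) R C := by
  obtain ⟨hL, hr⟩ := h
  rw [pvAdd2_eq_set hp]
  refine ⟨by simpa using hL, ?_⟩
  intro r hrm
  by_cases hlt : p.toNat < g.length
  · rcases List.mem_or_eq_of_mem_set hrm with h' | h'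
    · exact hr _ h'
    · subst h'
      rw [PySem.List.length_pySetD]
      exact length_row ⟨hL, hr⟩ (by omega)
  · rw [List.set_eq_of_length_le (by omega)] at hrm
    exact hr _ hrm

lemma row_upd_getD {r : List Int} {q : Int} (hq : 0 ≤ q) (hqC : q.toNat < r.length)
    (v : Int) (j : Nat) :
    (PySem.List.pySetD r q (PySem.List.pyGetD r q 0 + v)).getD j 0
      = r.getD j 0 + if j = q.toNat then v else 0 := by
  rw [PySem.List.pySetD_of_nonneg _ _ hq, PySem.List.pyGetD_of_nonneg _ _ hq]
  rw [List.getD_eq_getElem?_getD, List.getElem?_set]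
  split_ifs with h1 h2 h3
  · subst h1; simp [List.getD_eq_getElem?_getD]
  · omega
  · omega
  · rw [List.getD_eq_getElem?_getD]; ring

lemma getD_set_getD {α : Type} (l : List α) (n : Nat) (a : α) (i : Nat) (d : α) :
    (l.set n a).getD i d = if n = i ∧ n < l.length then a else l.getD i d := by
  rw [List.getD_eq_getElem?_getD, List.getElem?_set]
  split_ifs with h1 h2 h3 <;> (simp_all [List.getD_eq_getElem?_getD]; try omega)

lemma ent_pvAdd2 {g : List (List Int)} {R C : Nat} (h : ShapeG g R C) {p q : Int}
    (hp : 0 ≤ p) (hq : 0 ≤ q) (hpR : p.toNat < R) (hqC : q.toNat < C) (v : Int) (i j : Nat) :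
    EntG (pvAdd2 g p q v) i j = EntG g i j + if i = p.toNat ∧ j = q.toNat then v else 0 := by
  rw [pvAdd2_eq_set hp]
  unfold EntG
  rw [getD_set_getD]
  by_cases hip : p.toNat = i
  · have hlt : p.toNat < g.length := by have := h.1; omega
    rw [if_pos ⟨hip, hlt⟩, row_upd_getD hq (by rw [length_row h hpR]; exact hqC) v j, hip]
    by_cases hjq : j = q.toNat <;> simp [hjq]
  · rw [if_neg (by omega)]
    have : ¬ (i = p.toNat ∧ j = q.toNat) := by omega
    rw [if_neg this, add_zero]

-- value contributed at cell (i, j) by the four difference marks of skill s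
def markS (s : List Int) (i j : Nat) : Int :=
  (if i = (aS s).toNat ∧ j = (bS s).toNat then -degS s else 0) +
  (if i = (aS s).toNat ∧ j = (dS s + 1).toNat then degS s else 0) +
  (if i = (cS s + 1).toNat ∧ j = (bS s).toNat then degS s else 0) +
  (if i = (cS s + 1).toNat ∧ j = (dS s + 1).toNat then -degS s else 0)

lemma pvStepA_eq (g : List (List Int)) (s : List Int) :
    pvStepA g s =
      pvAdd2 (pvAdd2 (pvAdd2 (pvAdd2 g (aS s) (bS s) (-degS s)) (aS s) (dS s + 1) (degS s))
        (cS s + 1) (bS s) (degS s)) (cS s + 1) (dS s + 1) (-degS s) := rfl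

lemma shape_pvStepA {g : List (List Int)} {R C : Nat} {N M : Int} (h : ShapeG g R C)
    {s : List Int} (ok : OkS s N M) : ShapeG (pvStepA g s) R C := by
  obtain ⟨o1, o2, o3, o4, o5, o6, o7, o8⟩ := ok
  rw [pvStepA_eq]
  exact shape_pvAdd2 (shape_pvAdd2 (shape_pvAdd2 (shape_pvAdd2 h o1 _ _) o1 _ _) o3 _ _) o3 _ _

lemma ent_pvStepA {g : List (List Int)} {R C : Nat} {N M : Int}
    (hR : R = (N+1).toNat) (hC : C = (M+1).toNat) (h : ShapeG g R C)
    {s : List Int} (ok : OkS s N M) (i j : Nat) :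
    EntG (pvStepA g s) i j = EntG g i j + markS s i j := by
  obtain ⟨o1, o2, o3, o4, o5, o6, o7, o8⟩ := ok
  have h1 := shape_pvAdd2 h o1 (bS s) (-degS s)
  have h2 := shape_pvAdd2 h1 o1 (dS s + 1) (degS s)
  have h3 := shape_pvAdd2 h2 o3 (bS s) (degS s)
  rw [pvStepA_eq]
  rw [ent_pvAdd2 h3 o3 o7 (by omega) (by omega) (-degS s) i j]
  rw [ent_pvAdd2 h2 o3 o5 (by omega) (by omega) (degS s) i j]
  rw [ent_pvAdd2 h1 o1 o7 (by omega) (by omega) (degS s) i j]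
  rw [ent_pvAdd2 h o1 o5 (by omega) (by omega) (-degS s) i j]
  unfold markS
  ring

lemma ent_foldS {N M : Int} {R C : Nat} (hR : R = (N+1).toNat) (hC : C = (M+1).toNat)
    (skill : List (List Int)) :
    ∀ g : List (List Int), ShapeG g R C → (∀ s ∈ skill, OkS s N M) →
      ShapeG (skill.foldl pvStepA g) R C ∧
      ∀ i j, EntG (skill.foldl pvStepA g) i j
        = EntG g i j + (skill.map (fun s => markS s i j)).sum := by
  induction skill with
  | nil => exact fun g hg _ => ⟨hg, fun i j => by simp⟩
  | cons s l ih =>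
    intro g hg hok
    have oks := hok s (List.mem_cons_self ..)
    have h1 : ShapeG (pvStepA g s) R C := shape_pvStepA hg oks
    obtain ⟨hsh, hent⟩ := ih (pvStepA g s) h1 (fun t ht => hok t (List.mem_cons_of_mem _ ht))
    refine ⟨hsh, fun i j => ?_⟩
    rw [List.foldl_cons, hent, ent_pvStepA hR hC hg oks]
    simp only [List.map_cons, List.sum_cons]
    ring

lemma shape_init (N M : Int) :
    ShapeG ((PySem.List.pyRange 0 (N+1) 1).map (fun _ => List.replicate (M+1).toNat 0))
      (N+1).toNat (M+1).toNat := by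
  constructor
  · simp [PySem.List.length_pyRange_one]
  · intro r hr
    obtain ⟨x, -, rfl⟩ := List.mem_map.1 hr
    simp

lemma ent_init (N M : Int) (i j : Nat) :
    EntG ((PySem.List.pyRange 0 (N+1) 1).map (fun _ => List.replicate (M+1).toNat 0)) i j = 0 := by
  unfold EntG
  rw [List.getD_eq_getElem?_getD
    (l := (PySem.List.pyRange 0 (N+1) 1).map (fun _ => List.replicate (M+1).toNat 0))
    (i := i) (a := ([] : List Int)), List.getElem?_map]
  cases h : (PySem.List.pyRange 0 (N+1) 1)[i]? <;>
    simp [List.getD_eq_getElem?_getD, List.getElem?_replicate]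
  split <;> rfl

lemma pvGet2_eq {g : List (List Int)} {p q : Int} (hp : 0 ≤ p) (hq : 0 ≤ q) :
    pvGet2 g p q = EntG g p.toNat q.toNat := by
  unfold pvGet2 EntG
  rw [PySem.List.pyGetD_of_nonneg _ _ hp, PySem.List.pyGetD_of_nonneg _ _ hq]

lemma pyRange_toNat (x : Int) :
    PySem.List.pyRange 0 x 1 = PySem.List.pyRange 0 ((x.toNat : Int)) 1 := by
  by_cases h : 0 ≤ x
  · rw [Int.toNat_of_nonneg h]
  · rw [PySem.List.pyRange_one_eq_nil (by omega), PySem.List.pyRange_one_eq_nil (by omega)]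

-- one horizontal pass over row p: entries of row p up to column k become prefix sums
lemma inner2 {R C : Nat} {M : Int} (hC : C = (M+1).toNat) {p : Int} (hp : 0 ≤ p)
    (hpR : p.toNat < R) :
    ∀ k : Nat, (k : Int) ≤ M → ∀ g : List (List Int), ShapeG g R C →
      ShapeG ((PySem.List.pyRange 0 (k : Int) 1).foldl
        (fun g j => pvAdd2 g p (j+1) (pvGet2 g p j)) g) R C ∧
      ∀ i j, EntG ((PySem.List.pyRange 0 (k : Int) 1).foldl
          (fun g j => pvAdd2 g p (j+1) (pvGet2 g p j)) g) i j
        = if i = p.toNat ∧ j ≤ k then ∑ t ∈ Finset.range (j+1), EntG g i t else EntG g i j := by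
  intro k
  induction k with
  | zero =>
    intro _ g hg
    rw [PySem.List.pyRange_one_eq_nil (by omega)]
    refine ⟨hg, fun i j => ?_⟩
    simp only [List.foldl_nil]
    split_ifs with h
    · obtain ⟨rfl, hj⟩ := h
      obtain rfl : j = 0 := by omega
      simp
    · rfl
  | succ k ih =>
    intro hk g hg
    have hk' : (k : Int) ≤ M := by omega
    obtain ⟨ih_sh, ih_ent⟩ := ih hk' g hg
    have hcast : ((k+1 : Nat) : Int) = (k : Int) + 1 := by push_cast; ring
    rw [hcast, PySem.List.pyRange_one_succ_right (by omega), List.foldl_append, List.foldl_cons,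
      List.foldl_nil]
    set g1 := (PySem.List.pyRange 0 (k : Int) 1).foldl
      (fun g j => pvAdd2 g p (j+1) (pvGet2 g p j)) g with hg1
    have hval : pvGet2 g1 p (k : Int) = ∑ t ∈ Finset.range (k+1), EntG g p.toNat t := by
      rw [pvGet2_eq hp (by omega), ih_ent]
      simp
    have hq1 : (0:Int) ≤ (k:Int) + 1 := by omega
    have hqC : ((k:Int)+1).toNat < C := by omega
    have hent2 := ent_pvAdd2 ih_sh hp hq1 hpR hqC (pvGet2 g1 p (k : Int))
    refine ⟨shape_pvAdd2 ih_sh hp _ _, fun i j => ?_⟩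
    rw [hent2 i j, hval, ih_ent i j]
    have htn : ((k:Int)+1).toNat = k + 1 := by omega
    rw [htn]
    by_cases hip : i = p.toNat
    · subst hip
      by_cases hj1 : j = k + 1
      · subst hj1
        rw [if_neg (by omega), if_pos ⟨rfl, rfl⟩, if_pos ⟨rfl, by omega⟩]
        rw [Finset.sum_range_succ (f := fun t => EntG g p.toNat t) (n := k + 1)]
        ring
      · by_cases hjk : j ≤ k
        · rw [if_pos ⟨rfl, hjk⟩, if_neg (by omega), if_pos ⟨rfl, by omega⟩, add_zero]
        · rw [if_neg (by omega), if_neg (by omega), if_neg (by omega), add_zero]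
    · rw [if_neg (by omega), if_neg (by omega), if_neg (by omega), add_zero]

-- the whole horizontal phase: every row becomes its prefix-sum row
lemma outer2 {R C : Nat} {N M : Int} (hR : R = (N+1).toNat) (hC : C = (M+1).toNat) :
    ∀ k : Nat, (k : Int) ≤ N + 1 → ∀ g : List (List Int), ShapeG g R C →
      ShapeG ((PySem.List.pyRange 0 (k : Int) 1).foldl (fun g i =>
        (PySem.List.pyRange 0 M 1).foldl (fun g j => pvAdd2 g i (j+1) (pvGet2 g i j)) g) g) R C ∧
      ∀ i j, j < C → EntG ((PySem.List.pyRange 0 (k : Int) 1).foldl (fun g i =>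
          (PySem.List.pyRange 0 M 1).foldl (fun g j => pvAdd2 g i (j+1) (pvGet2 g i j)) g) g) i j
        = if i < k then ∑ t ∈ Finset.range (j+1), EntG g i t else EntG g i j := by
  intro k
  induction k with
  | zero =>
    intro _ g hg
    rw [PySem.List.pyRange_one_eq_nil (a := (0:Int)) (b := (((0:Nat) : Int))) (by omega)]
    exact ⟨hg, fun i j _ => by simp⟩
  | succ k ih =>
    intro hk g hg
    obtain ⟨ih_sh, ih_ent⟩ := ih (by omega) g hg
    have hcast : ((k+1 : Nat) : Int) = (k : Int) + 1 := by push_cast; ring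
    rw [hcast, PySem.List.pyRange_one_succ_right (by omega), List.foldl_append, List.foldl_cons,
      List.foldl_nil]
    set g1 := (PySem.List.pyRange 0 (k : Int) 1).foldl (fun g i =>
      (PySem.List.pyRange 0 M 1).foldl (fun g j => pvAdd2 g i (j+1) (pvGet2 g i j)) g) g with hg1
    by_cases hM : 0 ≤ M
    · have hpR : ((k:Int)).toNat < R := by omega
      have hMrw : PySem.List.pyRange 0 M 1 = PySem.List.pyRange 0 ((M.toNat : Int)) 1 :=
        pyRange_toNat M
      rw [hMrw]
      obtain ⟨in_sh, in_ent⟩ := inner2 hC (by omega : (0:Int) ≤ (k:Int)) hpR M.toNat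
        (by omega) g1 ih_sh
      refine ⟨in_sh, fun i j hj => ?_⟩
      rw [in_ent i j]
      have hktn : ((k:Int)).toNat = k := by omega
      rw [hktn]
      by_cases hik : i = k
      · subst hik
        rw [if_pos ⟨rfl, by omega⟩, if_pos (by omega)]
        apply Finset.sum_congr rfl
        intro t ht
        rw [ih_ent i t (by simp at ht; omega), if_neg (by omega)]
      · rw [if_neg (by omega), ih_ent i j hj]
        by_cases hik' : i < k
        · rw [if_pos hik', if_pos (by omega)]
        · rw [if_neg hik', if_neg (by omega)]
    · have hMnil : PySem.List.pyRange 0 M 1 = [] := PySem.List.pyRange_one_eq_nil (by omega)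
      rw [hMnil]
      simp only [List.foldl_nil]
      exact ⟨ih_sh, fun i j hj => by omega⟩

-- one vertical pass down column q: entries of column q up to row k become prefix sums
lemma inner3 {R C : Nat} {N : Int} (hR : R = (N+1).toNat) {q : Int} (hq : 0 ≤ q)
    (hqC : q.toNat < C) :
    ∀ k : Nat, (k : Int) ≤ N → ∀ g : List (List Int), ShapeG g R C →
      ShapeG ((PySem.List.pyRange 0 (k : Int) 1).foldl
        (fun g i => pvAdd2 g (i+1) q (pvGet2 g i q)) g) R C ∧
      ∀ i j, EntG ((PySem.List.pyRange 0 (k : Int) 1).foldl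
          (fun g i => pvAdd2 g (i+1) q (pvGet2 g i q)) g) i j
        = if j = q.toNat ∧ i ≤ k then ∑ u ∈ Finset.range (i+1), EntG g u j else EntG g i j := by
  intro k
  induction k with
  | zero =>
    intro _ g hg
    rw [PySem.List.pyRange_one_eq_nil (by omega)]
    refine ⟨hg, fun i j => ?_⟩
    simp only [List.foldl_nil]
    split_ifs with h
    · obtain ⟨rfl, hi⟩ := h
      obtain rfl : i = 0 := by omega
      simp
    · rfl
  | succ k ih =>
    intro hk g hg
    have hk' : (k : Int) ≤ N := by omega
    obtain ⟨ih_sh, ih_ent⟩ := ih hk' g hg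
    have hcast : ((k+1 : Nat) : Int) = (k : Int) + 1 := by push_cast; ring
    rw [hcast, PySem.List.pyRange_one_succ_right (by omega), List.foldl_append, List.foldl_cons,
      List.foldl_nil]
    set g1 := (PySem.List.pyRange 0 (k : Int) 1).foldl
      (fun g i => pvAdd2 g (i+1) q (pvGet2 g i q)) g with hg1
    have hval : pvGet2 g1 (k : Int) q = ∑ u ∈ Finset.range (k+1), EntG g u q.toNat := by
      rw [pvGet2_eq (by omega) hq, ih_ent]
      simp
    have hp1 : (0:Int) ≤ (k:Int) + 1 := by omega
    have hpR : ((k:Int)+1).toNat < R := by omega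
    have hent2 := ent_pvAdd2 ih_sh hp1 hq hpR hqC (pvGet2 g1 (k : Int) q)
    refine ⟨shape_pvAdd2 ih_sh hp1 _ _, fun i j => ?_⟩
    rw [hent2 i j, hval, ih_ent i j]
    have htn : ((k:Int)+1).toNat = k + 1 := by omega
    rw [htn]
    by_cases hjq : j = q.toNat
    · subst hjq
      by_cases hi1 : i = k + 1
      · subst hi1
        rw [if_neg (by omega), if_pos ⟨rfl, rfl⟩, if_pos ⟨rfl, by omega⟩]
        rw [Finset.sum_range_succ (f := fun u => EntG g u q.toNat) (n := k + 1)]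
        ring
      · by_cases hik : i ≤ k
        · rw [if_pos ⟨rfl, hik⟩, if_neg (by omega), if_pos ⟨rfl, by omega⟩, add_zero]
        · rw [if_neg (by omega), if_neg (by omega), if_neg (by omega), add_zero]
    · rw [if_neg (by omega), if_neg (by omega), if_neg (by omega), add_zero]

-- the whole vertical phase: every column becomes its prefix-sum column
lemma outer3 {R C : Nat} {N M : Int} (hR : R = (N+1).toNat) (hC : C = (M+1).toNat) :
    ∀ k : Nat, (k : Int) ≤ M + 1 → ∀ g : List (List Int), ShapeG g R C →
      ShapeG ((PySem.List.pyRange 0 (k : Int) 1).foldl (fun g j =>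
        (PySem.List.pyRange 0 N 1).foldl (fun g i => pvAdd2 g (i+1) j (pvGet2 g i j)) g) g) R C ∧
      ∀ i j, i < R → EntG ((PySem.List.pyRange 0 (k : Int) 1).foldl (fun g j =>
          (PySem.List.pyRange 0 N 1).foldl (fun g i => pvAdd2 g (i+1) j (pvGet2 g i j)) g) g) i j
        = if j < k then ∑ u ∈ Finset.range (i+1), EntG g u j else EntG g i j := by
  intro k
  induction k with
  | zero =>
    intro _ g hg
    rw [PySem.List.pyRange_one_eq_nil (a := (0:Int)) (b := (((0:Nat) : Int))) (by omega)]
    exact ⟨hg, fun i j _ => by simp⟩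
  | succ k ih =>
    intro hk g hg
    obtain ⟨ih_sh, ih_ent⟩ := ih (by omega) g hg
    have hcast : ((k+1 : Nat) : Int) = (k : Int) + 1 := by push_cast; ring
    rw [hcast, PySem.List.pyRange_one_succ_right (by omega), List.foldl_append, List.foldl_cons,
      List.foldl_nil]
    set g1 := (PySem.List.pyRange 0 (k : Int) 1).foldl (fun g j =>
      (PySem.List.pyRange 0 N 1).foldl (fun g i => pvAdd2 g (i+1) j (pvGet2 g i j)) g) g with hg1
    have hqC : ((k:Int)).toNat < C := by omega
    by_cases hN : 0 ≤ N
    · have hNrw : PySem.List.pyRange 0 N 1 = PySem.List.pyRange 0 ((N.toNat : Int)) 1 :=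
        pyRange_toNat N
      rw [hNrw]
      obtain ⟨in_sh, in_ent⟩ := inner3 hR (by omega : (0:Int) ≤ (k:Int)) hqC N.toNat
        (by omega) g1 ih_sh
      refine ⟨in_sh, fun i j hi => ?_⟩
      rw [in_ent i j]
      have hktn : ((k:Int)).toNat = k := by omega
      rw [hktn]
      by_cases hjk : j = k
      · subst hjk
        rw [if_pos ⟨rfl, by omega⟩, if_pos (by omega)]
        apply Finset.sum_congr rfl
        intro u hu
        rw [ih_ent u j (by simp at hu; omega), if_neg (by omega)]
      · rw [if_neg (by omega), ih_ent i j hi]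
        by_cases hjk' : j < k
        · rw [if_pos hjk', if_pos (by omega)]
        · rw [if_neg hjk', if_neg (by omega)]
    · have hNnil : PySem.List.pyRange 0 N 1 = [] := PySem.List.pyRange_one_eq_nil (by omega)
      rw [hNnil]
      simp only [List.foldl_nil]
      exact ⟨ih_sh, fun i j hi => by omega⟩

-- ---- B-side ----

-- contribution of one normalized skill tuple to cell (i, j) (B's four conditional updates)
def ctrb (t : Int × Int × Int × Int × Int) (i j : Int) : Int :=
  (if t.1 ≤ i ∧ t.2.1 ≤ j then -t.2.2.2.2 else 0) +
  (if t.1 ≤ i ∧ t.2.2.2.1 + 1 ≤ j then t.2.2.2.2 else 0) +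
  (if t.2.2.1 + 1 ≤ i ∧ t.2.1 ≤ j then t.2.2.2.2 else 0) +
  (if t.2.2.1 + 1 ≤ i ∧ t.2.2.2.1 + 1 ≤ j then -t.2.2.2.2 else 0)

lemma pvCell_eq (deltas : List (Int × Int × Int × Int × Int)) (i j : Int) :
    pvCell deltas i j = (deltas.map (fun t => ctrb t i j)).sum := by
  unfold pvCell
  have hfun : (fun (v : Int) (t : Int × Int × Int × Int × Int) =>
      let v := if t.1 ≤ i ∧ t.2.1 ≤ j then v - t.2.2.2.2 else v
      let v := if t.1 ≤ i ∧ t.2.2.2.1 + 1 ≤ j then v + t.2.2.2.2 else v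
      let v := if t.2.2.1 + 1 ≤ i ∧ t.2.1 ≤ j then v + t.2.2.2.2 else v
      if t.2.2.1 + 1 ≤ i ∧ t.2.2.2.1 + 1 ≤ j then v - t.2.2.2.2 else v)
      = fun v t => v + ctrb t i j := by
    funext v t
    simp only [ctrb]
    split_ifs <;> ring
  rw [hfun, PySem.List.foldl_add]
  simp

lemma pvDelta_eq (s : List Int) : pvDelta s = (aS s, bS s, cS s, dS s, degS s) := rfl

lemma sum_pair_ind (i j X Y : Nat) (w : Int) :
    ∑ u ∈ Finset.range (i+1), ∑ t ∈ Finset.range (j+1), (if u = X ∧ t = Y then w else 0)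
      = if X ≤ i ∧ Y ≤ j then w else 0 := by
  have h1 : ∀ u, (∑ t ∈ Finset.range (j+1), if u = X ∧ t = Y then w else 0)
      = if u = X then (if Y ≤ j then w else 0) else 0 := by
    intro u
    by_cases hu : u = X
    · rw [if_pos hu]
      have e : ∀ t, (if u = X ∧ t = Y then w else 0) = (if t = Y then w else 0) := by
        intro t; by_cases ht : t = Y <;> simp [hu, ht]
      rw [Finset.sum_congr rfl (fun t _ => e t),
        Finset.sum_ite_eq' (Finset.range (j+1)) Y (fun _ => w)]
      simp [Finset.mem_range]
    · rw [if_neg hu]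
      have e : ∀ t, (if u = X ∧ t = Y then w else 0) = 0 := by intro t; simp [hu]
      rw [Finset.sum_congr rfl (fun t _ => e t)]
      simp
  rw [Finset.sum_congr rfl (fun u _ => h1 u),
    Finset.sum_ite_eq' (Finset.range (i+1)) X (fun _ => if Y ≤ j then w else 0)]
  simp only [Finset.mem_range, Nat.lt_succ_iff]
  split_ifs <;> first | rfl | omega
  
lemma ite_toNat (X : Int) (hX : 0 ≤ X) (Y : Int) (hY : 0 ≤ Y) (i j : Nat) (w : Int) :
    (if X.toNat ≤ i ∧ Y.toNat ≤ j then w else 0) = (if X ≤ (i:Int) ∧ Y ≤ (j:Int) then w else 0) := by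
  have h : (X.toNat ≤ i ∧ Y.toNat ≤ j) ↔ (X ≤ (i:Int) ∧ Y ≤ (j:Int)) := by omega
  simp only [h]

-- the four-marks double prefix sum collapses to B's four indicator terms
lemma markS_sum {s : List Int} {N M : Int} (ok : OkS s N M) (i j : Nat) :
    ∑ u ∈ Finset.range (i+1), ∑ t ∈ Finset.range (j+1), markS s u t
      = ctrb (pvDelta s) (i:Int) (j:Int) := by
  obtain ⟨o1, o2, o3, o4, o5, o6, o7, o8⟩ := ok
  unfold markS
  simp only [Finset.sum_add_distrib, sum_pair_ind]
  rw [ite_toNat _ o1 _ o5, ite_toNat _ o1 _ o7, ite_toNat _ o3 _ o5, ite_toNat _ o3 _ o7]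
  rw [pvDelta_eq]
  rfl

lemma sum_listmap_swap {β : Type} (S : Finset β) (l : List (List Int)) (f : List Int → β → Int) :
    ∑ x ∈ S, (l.map (fun s => f s x)).sum = (l.map (fun s => ∑ x ∈ S, f s x)).sum := by
  induction l with
  | nil => simp
  | cons s l ih => simp [Finset.sum_add_distrib, ih]

-- ---- assembling both sides ----

lemma outer2' {N M : Int} (g : List (List Int)) (hg : ShapeG g (N+1).toNat (M+1).toNat) :
    ShapeG ((PySem.List.pyRange 0 (N+1) 1).foldl (fun g i =>
      (PySem.List.pyRange 0 M 1).foldl (fun g j => pvAdd2 g i (j+1) (pvGet2 g i j)) g) g)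
      (N+1).toNat (M+1).toNat ∧
    ∀ i j, j < (M+1).toNat →
      EntG ((PySem.List.pyRange 0 (N+1) 1).foldl (fun g i =>
        (PySem.List.pyRange 0 M 1).foldl (fun g j => pvAdd2 g i (j+1) (pvGet2 g i j)) g) g) i j
      = if i < (N+1).toNat then ∑ t ∈ Finset.range (j+1), EntG g i t else EntG g i j := by
  by_cases hN : 0 ≤ N + 1
  · rw [pyRange_toNat (N+1)]
    exact outer2 rfl rfl (N+1).toNat (by omega) g hg
  · rw [PySem.List.pyRange_one_eq_nil (a := (0:Int)) (b := N+1) (by omega)]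
    simp only [List.foldl_nil]
    exact ⟨hg, fun i j hj => by rw [if_neg (by omega)]⟩

lemma outer3' {N M : Int} (g : List (List Int)) (hg : ShapeG g (N+1).toNat (M+1).toNat) :
    ShapeG ((PySem.List.pyRange 0 (M+1) 1).foldl (fun g j =>
      (PySem.List.pyRange 0 N 1).foldl (fun g i => pvAdd2 g (i+1) j (pvGet2 g i j)) g) g)
      (N+1).toNat (M+1).toNat ∧
    ∀ i j, i < (N+1).toNat →
      EntG ((PySem.List.pyRange 0 (M+1) 1).foldl (fun g j =>
        (PySem.List.pyRange 0 N 1).foldl (fun g i => pvAdd2 g (i+1) j (pvGet2 g i j)) g) g) i j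
      = if j < (M+1).toNat then ∑ u ∈ Finset.range (i+1), EntG g u j else EntG g i j := by
  by_cases hM : 0 ≤ M + 1
  · rw [pyRange_toNat (M+1)]
    exact outer3 rfl rfl (M+1).toNat (by omega) g hg
  · rw [PySem.List.pyRange_one_eq_nil (a := (0:Int)) (b := M+1) (by omega)]
    simp only [List.foldl_nil]
    exact ⟨hg, fun i j hi => by rw [if_neg (by omega)]⟩

lemma entA {skill : List (List Int)} {N M : Int} (hok : ∀ s ∈ skill, OkS s N M) :
    ShapeG (skill_operation skill N M) (N+1).toNat (M+1).toNat ∧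
    ∀ i j, i < (N+1).toNat → j < (M+1).toNat →
      EntG (skill_operation skill N M) i j
        = ∑ u ∈ Finset.range (i+1), ∑ t ∈ Finset.range (j+1),
            (skill.map (fun s => markS s u t)).sum := by
  obtain ⟨h1, e1⟩ := ent_foldS rfl rfl skill _ (shape_init N M) hok
  obtain ⟨h2, e2⟩ := outer2' _ h1
  obtain ⟨h3, e3⟩ := outer3' _ h2
  have hrw : skill_operation skill N M
      = (PySem.List.pyRange 0 (M+1) 1).foldl (fun g j =>
          (PySem.List.pyRange 0 N 1).foldl (fun g i => pvAdd2 g (i+1) j (pvGet2 g i j)) g)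
        ((PySem.List.pyRange 0 (N+1) 1).foldl (fun g i =>
          (PySem.List.pyRange 0 M 1).foldl (fun g j => pvAdd2 g i (j+1) (pvGet2 g i j)) g)
          (skill.foldl pvStepA
            ((PySem.List.pyRange 0 (N+1) 1).map (fun _ => List.replicate (M+1).toNat 0)))) := rfl
  rw [hrw]
  refine ⟨h3, fun i j hi hj => ?_⟩
  rw [e3 i j hi, if_pos hj]
  refine Finset.sum_congr rfl fun u hu => ?_
  rw [e2 u j hj, if_pos (by simp at hu; omega)]
  refine Finset.sum_congr rfl fun t ht => ?_
  rw [e1 u t, ent_init, zero_add]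

lemma getElem_entG {g : List (List Int)} {i j : Nat} (hi : i < g.length) (hj : j < g[i].length) :
    g[i][j] = EntG g i j := by
  unfold EntG
  rw [List.getD_eq_getElem g [] hi, List.getD_eq_getElem _ 0 hj]

lemma entB {skill : List (List Int)} {N M : Int} :
    ShapeG (skill_operation_alt skill N M) (N+1).toNat (M+1).toNat ∧
    ∀ i j, i < (N+1).toNat → j < (M+1).toNat →
      EntG (skill_operation_alt skill N M) i j = pvCell (skill.map pvDelta) (i:Int) (j:Int) := by
  refine ⟨⟨by simp [skill_operation_alt, PySem.List.length_pyRange_one], ?_⟩, ?_⟩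
  · intro r hr
    simp only [skill_operation_alt] at hr
    obtain ⟨x, -, rfl⟩ := List.mem_map.1 hr
    simp [PySem.List.length_pyRange_one]
  · intro i j hi hj
    unfold EntG skill_operation_alt
    rw [List.getD_eq_getElem _ []
      (by simp only [List.length_map, PySem.List.length_pyRange_one]; omega), List.getElem_map]
    rw [List.getD_eq_getElem _ 0
      (by simp only [List.length_map, PySem.List.length_pyRange_one]; omega), List.getElem_map]
    rw [PySem.List.getElem_pyRange_one, PySem.List.getElem_pyRange_one]
    norm_num

-- ===== VERDICT (by name: the statement is the Claim_ definition above) =====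
theorem skill_operation_spec : Claim_equal_skill_operation := by
  intro skill N M _ hpre
  unfold Spec_skill_operation
  have hok : ∀ s ∈ skill, OkS s N M := fun s hs => pre_okS hpre hs
  obtain ⟨hAsh, hAent⟩ := entA hok
  obtain ⟨hBsh, hBent⟩ := entB (skill := skill) (N := N) (M := M)
  apply List.ext_getElem
  · rw [hAsh.1, hBsh.1]
  · intro i h1 h2
    apply List.ext_getElem
    · rw [hAsh.2 _ (List.getElem_mem h1), hBsh.2 _ (List.getElem_mem h2)]
    · intro j hj1 hj2
      have hiR : i < (N+1).toNat := by rw [← hAsh.1]; exact h1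
      have hjC : j < (M+1).toNat := by
        have := hAsh.2 _ (List.getElem_mem h1); omega
      rw [getElem_entG h1 hj1, getElem_entG h2 hj2,
        hAent i j hiR hjC, hBent i j hiR hjC, pvCell_eq, List.map_map]
      have step1 : ∀ u ∈ Finset.range (i+1),
          (∑ t ∈ Finset.range (j+1), (skill.map (fun s => markS s u t)).sum)
            = (skill.map (fun s => ∑ t ∈ Finset.range (j+1), markS s u t)).sum := by
        intro u _
        exact sum_listmap_swap (Finset.range (j+1)) skill (fun s t => markS s u t)
      rw [Finset.sum_congr rfl step1,
        sum_listmap_swap (Finset.range (i+1)) skill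
          (fun s u => ∑ t ∈ Finset.range (j+1), markS s u t)]
      apply congrArg List.sum
      refine List.map_congr_left fun s hs => ?_
      exact markS_sum (hok s hs) i j
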